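-- pv_equiv track=rewrite | github.com/pypi-data/pypi-mirror-401 | packages/nn-rag/nn_rag-2.2.4.tar.gz/nn_rag-2.2.4/ab/rag/extract_blocks.py | _contains_duplicate_types
-- ===== SOURCE A (Python) =====
-- def _contains_duplicate_types(source_code: str, imported_types: set) -> bool:
--     """Check if source code contains types that are already imported."""
--     if not source_code:
--         return False
--
--     # Common PyTorch type aliases to check for
--     pytorch_types = {
--         '_ratio_2_t', '_ratio_3_t', '_size_1_t', '_size_2_opt_t', '_size_2_t',
--         '_size_3_opt_t', '_size_3_t', '_size_any_opt_t', '_size_any_t'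
--     }
--
--     for line in source_code.splitlines():
--         stripped = line.strip()
--         for type_name in pytorch_types:
--             if type_name in stripped and type_name in imported_types:
--                 return True
--
--     return False
-- ===== SOURCE B (Python) =====
-- def _contains_duplicate_types(source_code: str, imported_types: set) -> bool:
--     """Check if source code contains types that are already imported."""
--     pytorch_types = {
--         '_ratio_2_t', '_ratio_3_t', '_size_1_t', '_size_2_opt_t', '_size_2_t',
--         '_size_3_opt_t', '_size_3_t', '_size_any_opt_t', '_size_any_t'
--     }
--     candidates = pytorch_types.intersection(imported_types)
--     return any(t in source_code for t in candidates)
-- ===== Notes on version B (the rewrite author's own statement) =====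
-- stated objective: simpler
-- what changed: B intersects the fixed alias set with imported_types once and does a single whole-string containment scan per candidate, dropping A's per-line splitlines/strip loop and its inner membership re-test (sound because the alias names contain no whitespace or newline characters).
import Mathlib
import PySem

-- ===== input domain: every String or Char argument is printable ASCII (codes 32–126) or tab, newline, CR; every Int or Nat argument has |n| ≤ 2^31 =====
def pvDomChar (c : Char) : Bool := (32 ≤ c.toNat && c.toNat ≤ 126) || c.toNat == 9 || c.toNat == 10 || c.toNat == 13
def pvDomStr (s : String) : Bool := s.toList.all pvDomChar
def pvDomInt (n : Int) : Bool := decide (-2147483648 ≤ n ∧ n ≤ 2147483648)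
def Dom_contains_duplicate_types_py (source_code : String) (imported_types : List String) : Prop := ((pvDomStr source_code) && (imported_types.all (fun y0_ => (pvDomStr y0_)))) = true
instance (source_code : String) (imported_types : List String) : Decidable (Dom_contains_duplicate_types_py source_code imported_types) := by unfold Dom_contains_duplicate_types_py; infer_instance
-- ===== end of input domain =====

-- B intersects the fixed alias set with imported_types once and scans the whole source once per
-- candidate, replacing A's per-line splitlines/strip double loop (objective: simpler).

-- the set literal of PyTorch type-alias names, in source order
def pvPytorchTypesList : List String :=
  ["_ratio_2_t", "_ratio_3_t", "_size_1_t", "_size_2_opt_t", "_size_2_t",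
   "_size_3_opt_t", "_size_3_t", "_size_any_opt_t", "_size_any_t"]

-- ===== PORT A =====
def contains_duplicate_types_py (source_code : String) (imported_types : List String) : Bool :=
  if source_code = "" then false
  else
    (PySem.Str.splitlines source_code).any (fun line =>
      let stripped := PySem.Str.strip line
      (PySem.Set.ofList pvPytorchTypesList).any (fun type_name =>
        PySem.Str.isIn type_name stripped && PySem.Set.contains imported_types type_name))

-- ===== PORT B =====
def contains_duplicate_types_py_alt (source_code : String) (imported_types : List String) : Bool :=
  let candidates := PySem.Set.inter (PySem.Set.ofList pvPytorchTypesList) imported_types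
  candidates.any (fun t => PySem.Str.isIn t source_code)

-- ===== PRECONDITION & SPEC =====
def Spec_contains_duplicate_types_py (source_code : String) (imported_types : List String) (out : Bool) : Prop := out = contains_duplicate_types_py_alt source_code imported_types
instance (source_code : String) (imported_types : List String) (out : Bool) : Decidable (Spec_contains_duplicate_types_py source_code imported_types out) := by unfold Spec_contains_duplicate_types_py; infer_instance

-- ===== CLAIM (what is proved, stated in full; the proofs are below) =====
def Claim_equal_contains_duplicate_types_py : Prop := ∀ (source_code : String) (imported_types : List String), Dom_contains_duplicate_types_py source_code imported_types → Spec_contains_duplicate_types_py source_code imported_types (contains_duplicate_types_py source_code imported_types)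

-- ===== LEMMAS AND PROOFS =====

-- the alias name is suitable: nonempty, whitespace-free, and free of Python line-break characters
def pvOkName (t : String) : Prop :=
  t.toList ≠ [] ∧ (∀ c ∈ t.toList, PySem.Chars.isspace c = false) ∧
    ∀ c ∈ t.toList,
      (decide (c.toNat = 10) || decide (c.toNat = 13) || decide (c.toNat = 11) ||
       decide (c.toNat = 12) || decide (c.toNat = 28) || decide (c.toNat = 29) ||
       decide (c.toNat = 30) || decide (c.toNat = 133) || decide (c.toNat = 8232) ||
       decide (c.toNat = 8233)) = false

-- Bool-level version of pvOkName, so that the 9-name check evaluates by rfl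
def pvOkNameB (t : String) : Bool :=
  (!t.toList.isEmpty) && t.toList.all (fun c =>
    !PySem.Chars.isspace c &&
    !(decide (c.toNat = 10) || decide (c.toNat = 13) || decide (c.toNat = 11) ||
      decide (c.toNat = 12) || decide (c.toNat = 28) || decide (c.toNat = 29) ||
      decide (c.toNat = 30) || decide (c.toNat = 133) || decide (c.toNat = 8232) ||
      decide (c.toNat = 8233)))

lemma pv_all_ok : ∀ t ∈ pvPytorchTypesList, pvOkName t := by
  have h : pvPytorchTypesList.all pvOkNameB = true := by rfl
  intro t ht
  have h2 := List.all_eq_true.mp h t ht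
  unfold pvOkNameB at h2
  unfold pvOkName
  simp only [Bool.and_eq_true, List.all_eq_true, Bool.not_eq_true'] at h2
  obtain ⟨he, hall⟩ := h2
  refine ⟨?_, fun c hc => (hall c hc).1, fun c hc => (hall c hc).2⟩
  intro hnil
  rw [hnil] at he
  simp at he

-- a prefix of a ++ c :: b that avoids c is a prefix of a
lemma pv_prefix_drop {t a b : List Char} {c : Char} (hc : c ∉ t) (h : t <+: a ++ c :: b) :
    t <+: a := by
  induction a generalizing t with
  | nil =>
    cases t with
    | nil => exact List.nil_prefix
    | cons y t' =>
      obtain ⟨h1, _⟩ := List.cons_prefix_cons.mp h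
      exact absurd (h1 ▸ List.mem_cons_self) hc
  | cons x a' ih =>
    cases t with
    | nil => exact List.nil_prefix
    | cons y t' =>
      rw [List.cons_append] at h
      obtain ⟨h1, h2⟩ := List.cons_prefix_cons.mp h
      subst h1
      exact List.cons_prefix_cons.mpr ⟨rfl, ih (fun hm => hc (List.mem_cons_of_mem _ hm)) h2⟩

-- an infix that avoids c cannot straddle the separator c
lemma pv_infix_split {t a b : List Char} {c : Char} (hc : c ∉ t) :
    t <:+: a ++ c :: b ↔ t <:+: a ∨ t <:+: b := by
  constructor
  · intro h
    induction a with
    | nil =>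
      rw [List.nil_append, List.infix_cons_iff] at h
      rcases h with hp | hi
      · cases t with
        | nil => exact Or.inl List.nil_infix
        | cons y t' =>
          obtain ⟨h1, _⟩ := List.cons_prefix_cons.mp hp
          exact absurd (h1 ▸ List.mem_cons_self) hc
      · exact Or.inr hi
    | cons x a' ih =>
      rw [List.cons_append, List.infix_cons_iff] at h
      rcases h with hp | hi
      · exact Or.inl (pv_prefix_drop (a := x :: a') hc (by rwa [List.cons_append])).isInfix
      · rcases ih hi with h1 | h2
        · exact Or.inl (List.infix_cons h1)
        · exact Or.inr h2
  · rintro (h | h)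
    · exact List.infix_append_of_infix_left h
    · exact List.infix_append_of_infix_right (List.infix_cons h)

-- Bool form of pv_infix_split
lemma pv_isIn_split {t a b : List Char} {c : Char} (hc : c ∉ t) :
    PySem.Chars.isIn t (a ++ c :: b) = (PySem.Chars.isIn t a || PySem.Chars.isIn t b) := by
  rw [Bool.eq_iff_iff, PySem.Chars.isIn_iff_infix, Bool.or_eq_true,
    PySem.Chars.isIn_iff_infix, PySem.Chars.isIn_iff_infix]
  exact pv_infix_split hc

lemma pv_isIn_nil {t : List Char} (ht : t ≠ []) : PySem.Chars.isIn t [] = false := by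
  rw [PySem.Chars.isIn_eq_false_iff, List.infix_nil]
  exact ht

-- dropWhile does not change containment of a pattern whose chars all fail the predicate
lemma pv_infix_dropWhile {p : Char → Bool} {t : List Char} (l : List Char)
    (hp : ∀ c ∈ t, p c = false) (ht : t ≠ []) :
    t <:+: l.dropWhile p ↔ t <:+: l := by
  induction l with
  | nil => simp
  | cons c l' ih =>
    rw [List.dropWhile_cons]
    by_cases hc : p c = true
    · rw [if_pos hc, ih, List.infix_cons_iff]
      constructor
      · exact Or.inr
      · rintro (hpre | hi)
        · cases t with
          | nil => exact absurd rfl ht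
          | cons y t' =>
            obtain ⟨h1, _⟩ := List.cons_prefix_cons.mp hpre
            rw [h1] at hp
            rw [hp c List.mem_cons_self] at hc
            exact absurd hc (by simp)
        · exact hi
    · rw [if_neg hc]

-- strip does not change containment of a whitespace-free nonempty pattern
lemma pv_infix_strip {t : List Char} (l : List Char)
    (hp : ∀ c ∈ t, PySem.Chars.isspace c = false) (ht : t ≠ []) :
    t <:+: PySem.Chars.strip l ↔ t <:+: l := by
  have hrev : ∀ c ∈ t.reverse, PySem.Chars.isspace c = false := by
    intro c hcm; exact hp c (List.mem_reverse.mp hcm)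
  have htr : t.reverse ≠ [] := by simpa using ht
  calc t <:+: PySem.Chars.strip l
      ↔ t.reverse <:+: (PySem.Chars.strip l).reverse := List.reverse_infix.symm
    _ ↔ t.reverse <:+: (PySem.Chars.lstrip l).reverse := by
          simp only [PySem.Chars.strip, PySem.Chars.rstrip, List.reverse_reverse]
          exact pv_infix_dropWhile _ hrev htr
    _ ↔ t <:+: PySem.Chars.lstrip l := List.reverse_infix
    _ ↔ t <:+: l := pv_infix_dropWhile _ hp ht

lemma pv_isIn_strip {t : List Char} (l : List Char)
    (hp : ∀ c ∈ t, PySem.Chars.isspace c = false) (ht : t ≠ []) :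
    PySem.Chars.isIn t (PySem.Chars.strip l) = PySem.Chars.isIn t l := by
  rw [Bool.eq_iff_iff, PySem.Chars.isIn_iff_infix, PySem.Chars.isIn_iff_infix]
  exact pv_infix_strip l hp ht

-- the accumulator of splitlines.go is a reversed prefix of its result
lemma pv_go_acc (isB : Char → Bool) (cs cur : List Char) (acc : List (List Char)) :
    PySem.Chars.splitlines.go isB cs cur acc
      = acc.reverse ++ PySem.Chars.splitlines.go isB cs cur [] := by
  refine PySem.Chars.splitlines.go.induct isB
    (fun cs cur _ => ∀ acc, PySem.Chars.splitlines.go isB cs cur acc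
      = acc.reverse ++ PySem.Chars.splitlines.go isB cs cur []) ?_ ?_ ?_ ?_ ?_ cs cur [] acc
  · intro cur acc h acc'
    simp [PySem.Chars.splitlines.go.eq_1, h]
  · intro cur acc h acc'
    simp [PySem.Chars.splitlines.go.eq_1, h]
  · intro rest cur acc ih acc'
    rw [PySem.Chars.splitlines.go.eq_2, PySem.Chars.splitlines.go.eq_2, ih]
    rw [ih [cur.reverse]]
    simp
  · intro c rest cur acc hne hB ih acc'
    rw [PySem.Chars.splitlines.go.eq_3 _ _ _ _ _ hne, PySem.Chars.splitlines.go.eq_3 _ _ _ _ _ hne,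
      if_pos hB, if_pos hB, ih]
    rw [ih [cur.reverse]]
    simp
  · intro c rest cur acc hne hB ih acc'
    rw [PySem.Chars.splitlines.go.eq_3 _ _ _ _ _ hne, PySem.Chars.splitlines.go.eq_3 _ _ _ _ _ hne,
      if_neg hB, if_neg hB, ih]

-- some line of splitlines.go contains t  iff  the remaining text contains t
lemma pv_go_any (isB : Char → Bool) {t : List Char} (ht : t ≠ [])
    (hB : ∀ c, isB c = true → c ∉ t) (hr : ('\r' : Char) ∉ t) (hn : ('\n' : Char) ∉ t)
    (cs cur : List Char) :
    ((PySem.Chars.splitlines.go isB cs cur []).any fun l => PySem.Chars.isIn t l)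
      = PySem.Chars.isIn t (cur.reverse ++ cs) := by
  refine PySem.Chars.splitlines.go.induct isB
    (fun cs cur _ => ((PySem.Chars.splitlines.go isB cs cur []).any fun l => PySem.Chars.isIn t l)
      = PySem.Chars.isIn t (cur.reverse ++ cs)) ?_ ?_ ?_ ?_ ?_ cs cur []
  · intro cur acc h
    rw [PySem.Chars.splitlines.go.eq_1, if_pos h, List.isEmpty_iff.mp h]
    simp [pv_isIn_nil ht]
  · intro cur acc h
    rw [PySem.Chars.splitlines.go.eq_1, if_neg h]
    simp
  · intro rest cur acc ih
    rw [PySem.Chars.splitlines.go.eq_2, pv_go_acc]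
    have h2 : PySem.Chars.isIn t ([] ++ ('\n' :: rest))
        = (PySem.Chars.isIn t [] || PySem.Chars.isIn t rest) := pv_isIn_split hn
    simp only [List.nil_append] at h2
    simp only [List.reverse_cons, List.reverse_nil, List.nil_append, List.any_append,
      List.any_cons, List.any_nil, Bool.or_false] at ih ⊢
    rw [ih, pv_isIn_split hr, h2, pv_isIn_nil ht, Bool.false_or]
  · intro c rest cur acc hne hBc ih
    rw [PySem.Chars.splitlines.go.eq_3 _ _ _ _ _ hne, if_pos hBc, pv_go_acc]
    simp only [List.reverse_cons, List.reverse_nil, List.nil_append, List.any_append,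
      List.any_cons, List.any_nil, Bool.or_false] at ih ⊢
    rw [ih, pv_isIn_split (hB c hBc)]
  · intro c rest cur acc hne hBc ih
    rw [PySem.Chars.splitlines.go.eq_3 _ _ _ _ _ hne, if_neg hBc, ih]
    simp

-- some line of splitlines contains t  iff  the whole text contains t
lemma pv_splitlines_isIn {t : List Char} (s : List Char) (ht : t ≠ [])
    (hB : ∀ c ∈ t,
      (decide (c.toNat = 10) || decide (c.toNat = 13) || decide (c.toNat = 11) ||
       decide (c.toNat = 12) || decide (c.toNat = 28) || decide (c.toNat = 29) ||
       decide (c.toNat = 30) || decide (c.toNat = 133) || decide (c.toNat = 8232) ||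
       decide (c.toNat = 8233)) = false) :
    ((PySem.Chars.splitlines s).any fun l => PySem.Chars.isIn t l) = PySem.Chars.isIn t s := by
  have hr : ('\r' : Char) ∉ t := fun hm => absurd (hB _ hm) (by decide)
  have hn : ('\n' : Char) ∉ t := fun hm => absurd (hB _ hm) (by decide)
  have hB' : ∀ c, (fun c : Char =>
      (decide (c.toNat = 10) || decide (c.toNat = 13) || decide (c.toNat = 11) ||
       decide (c.toNat = 12) || decide (c.toNat = 28) || decide (c.toNat = 29) ||
       decide (c.toNat = 30) || decide (c.toNat = 133) || decide (c.toNat = 8232) ||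
       decide (c.toNat = 8233))) c = true → c ∉ t := by
    intro c hc hm
    exact absurd ((hB c hm).symm.trans hc) (by simp)
  have hkey := pv_go_any _ ht hB' hr hn s []
  simp only [List.reverse_nil, List.nil_append] at hkey
  exact hkey

-- per-name bridge at the String level: A's line loop equals a single whole-string scan
lemma pv_master (t : String) (h : pvOkName t) (s : String) :
    ((PySem.Str.splitlines s).any fun line => PySem.Str.isIn t (PySem.Str.strip line))
      = PySem.Str.isIn t s := by
  obtain ⟨h1, h2, h3⟩ := h
  rw [PySem.Str.splitlines, List.any_map]
  have hcong : ∀ l, ((fun line => PySem.Str.isIn t (PySem.Str.strip line)) ∘ String.ofList) l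
      = PySem.Chars.isIn t.toList l := by
    intro l
    simp only [Function.comp, PySem.Str.isIn, PySem.Str.strip, String.toList_ofList]
    exact pv_isIn_strip l h2 h1
  rw [List.any_congr rfl hcong, pv_splitlines_isIn s.toList h1 h3]
  rfl

-- ===== VERDICT (by name: the statement is the Claim_ definition above) =====
theorem contains_duplicate_types_py_spec : Claim_equal_contains_duplicate_types_py := by
  intro s imp _
  unfold Spec_contains_duplicate_types_py contains_duplicate_types_py contains_duplicate_types_py_alt
  by_cases hs : s = ""
  · subst hs
    rw [if_pos rfl]
    symm
    rw [List.any_eq_false]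
    intro t hmem
    have htP : t ∈ pvPytorchTypesList := by
      have := (List.mem_filter.mp hmem).1
      rwa [PySem.Set.mem_ofList] at this
    have hok := pv_all_ok t htP
    simp only [PySem.Str.isIn, show ("" : String).toList = [] from rfl]
    simp [pv_isIn_nil hok.1]
  · rw [if_neg hs, Bool.eq_iff_iff]
    simp only [List.any_eq_true, Bool.and_eq_true, PySem.Set.inter, List.mem_filter,
      PySem.Set.mem_ofList]
    constructor
    · rintro ⟨line, hline, tn, htP, hin, hmem⟩
      refine ⟨tn, ⟨htP, hmem⟩, ?_⟩
      rw [← pv_master tn (pv_all_ok tn htP) s]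
      exact List.any_eq_true.mpr ⟨line, hline, hin⟩
    · rintro ⟨tn, ⟨htP, hmem⟩, hin⟩
      rw [← pv_master tn (pv_all_ok tn htP) s] at hin
      obtain ⟨line, hline, hi⟩ := List.any_eq_true.mp hin
      exact ⟨line, hline, tn, htP, hi, hmem⟩
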